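-- pv_equiv track=rewrite | github.com/Revi1337/BaekJoon-Coding-Test | SWEA/D4/1861. 정사각형 방/정사각형 방.py | solution
-- ===== SOURCE A (Python) =====
-- from collections import deque
--
-- drow = [-1, 0, 1, 0]
--
-- dcol = [0, 1, 0, -1]
--
-- def solution(N, board):
--     ans_val = 1
--     ans_counter = 1
--     check = [[0] * N for _ in range(N)]
--
--     for row in range(N):
--         for col in range(N):
--             if check[row][col]:
--                 continue
--
--             check[row][col] = 1
--             queue = deque([(row, col)])
--             node_val, counter = board[row][col], 1
--             while queue:
--                 r, c = queue.popleft()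
--                 for d in range(4):
--                     nr, nc = r + drow[d], c + dcol[d]
--                     if 0 <= nr < N and 0 <= nc < N:
--                         if abs(board[r][c] - board[nr][nc]) == 1 and not check[nr][nc]:
--                             check[nr][nc] = 1
--                             queue.append((nr, nc))
--                             node_val = min(node_val, board[nr][nc])
--                             counter += 1
--
--             if counter > ans_counter:
--                 ans_val, ans_counter = node_val, counter
--             elif counter == ans_counter:
--                 ans_val = min(ans_val, node_val)
--
--     return f'{ans_val} {ans_counter}'
-- ===== SOURCE B (Python) =====
-- def solution(N, board):
--     # Connected components (|value difference| == 1 adjacency) by min-label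
--     # propagation to a fixpoint, then one aggregation pass per label.
--     cells = N * N if N > 0 else 0
--     lab = list(range(cells))
--     changed = True
--     while changed:
--         changed = False
--         for i in range(cells):
--             r, c = i // N, i % N
--             v = board[r][c]
--             m = lab[i]
--             if r > 0 and abs(v - board[r - 1][c]) == 1:
--                 m = min(m, lab[i - N])
--             if r + 1 < N and abs(v - board[r + 1][c]) == 1:
--                 m = min(m, lab[i + N])
--             if c > 0 and abs(v - board[r][c - 1]) == 1:
--                 m = min(m, lab[i - 1])
--             if c + 1 < N and abs(v - board[r][c + 1]) == 1:
--                 m = min(m, lab[i + 1])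
--             if m < lab[i]:
--                 lab[i] = m
--                 changed = True
--     stats = {}
--     for i in range(cells):
--         v = board[i // N][i % N]
--         if lab[i] in stats:
--             sz, mn = stats[lab[i]]
--             stats[lab[i]] = (sz + 1, min(mn, v))
--         else:
--             stats[lab[i]] = (1, v)
--     best_val, best_cnt = 1, 1
--     for sz, mn in stats.values():
--         if sz > best_cnt or (sz == best_cnt and mn < best_val):
--             best_val, best_cnt = mn, sz
--     return f'{best_val} {best_cnt}'
-- ===== Notes on version B (the rewrite author's own statement) =====
-- stated objective: alternative
-- what changed: Replaces the per-component BFS flood fill (deque, visited matrix, per-cell neighbour scan) by whole-grid min-label propagation to a fixpoint followed by a single dict aggregation pass per label and one selection pass over the dict values.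
import Mathlib
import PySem

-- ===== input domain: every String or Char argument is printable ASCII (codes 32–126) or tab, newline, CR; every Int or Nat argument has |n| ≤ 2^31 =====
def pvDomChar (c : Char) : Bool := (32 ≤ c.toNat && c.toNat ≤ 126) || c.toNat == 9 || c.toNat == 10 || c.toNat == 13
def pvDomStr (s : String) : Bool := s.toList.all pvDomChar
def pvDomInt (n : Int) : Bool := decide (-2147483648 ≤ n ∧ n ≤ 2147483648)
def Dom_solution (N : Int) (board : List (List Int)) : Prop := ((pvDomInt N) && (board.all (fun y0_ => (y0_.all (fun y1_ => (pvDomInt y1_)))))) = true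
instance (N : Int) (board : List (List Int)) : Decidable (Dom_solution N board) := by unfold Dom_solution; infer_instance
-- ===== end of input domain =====

-- B replaces A's per-component BFS flood fill by whole-grid min-label propagation
-- to a fixpoint plus one dict aggregation pass (alternative algorithm, same values).


-- ===== PORT A =====
-- board[r][c] for indices the Python code has already bound-checked to
-- 0 ≤ r < N, 0 ≤ c < N (exact on Pre_solution, where those entries exist)
def bdGet (board : List (List Int)) (r c : Nat) : Int := (board.getD r []).getD c 0

-- the `check` matrix, represented by its lookup function (r, c) ↦ mark;
-- `check[r][c] = 1` becomes a pointwise update (same observable values)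
def chkSet (check : Nat → Nat → Bool) (r c : Nat) : Nat → Nat → Bool :=
  fun r' c' => if r' = r ∧ c' = c then true else check r' c'

-- the drow/dcol table, pairs in d = 0,1,2,3 order
def dirsA : List (Int × Int) := [(-1, 0), (0, 1), (1, 0), (0, -1)]

-- body of the BFS `for d in range(4)` over the state (queue, check, node_val, counter)
def stepA (N : Int) (board : List (List Int)) (r c : Nat)
    (st : List (Nat × Nat) × (Nat → Nat → Bool) × Int × Int) (d : Int × Int) :
    List (Nat × Nat) × (Nat → Nat → Bool) × Int × Int :=
  let nr : Int := (r : Int) + d.1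
  let nc : Int := (c : Int) + d.2
  if 0 ≤ nr ∧ nr < N ∧ 0 ≤ nc ∧ nc < N then
    if (bdGet board r c - bdGet board nr.toNat nc.toNat).natAbs = 1 ∧
        st.2.1 nr.toNat nc.toNat = false then
      (st.1 ++ [(nr.toNat, nc.toNat)], chkSet st.2.1 nr.toNat nc.toNat,
       min st.2.2.1 (bdGet board nr.toNat nc.toNat), st.2.2.2 + 1)
    else st
  else st

-- the `while queue:` loop; fuel only makes the recursion structural (it is
-- chosen large enough below; each popped cell was enqueued exactly once)
def bfsA (N : Int) (board : List (List Int)) :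
    Nat → List (Nat × Nat) → (Nat → Nat → Bool) → Int → Int →
      ((Nat → Nat → Bool) × Int × Int)
  | 0, _, check, nodeVal, counter => (check, nodeVal, counter)
  | _ + 1, [], check, nodeVal, counter => (check, nodeVal, counter)
  | fuel + 1, (r, c) :: queue, check, nodeVal, counter =>
    let st := dirsA.foldl (stepA N board r c) (queue, check, nodeVal, counter)
    bfsA N board fuel st.1 st.2.1 st.2.2.1 st.2.2.2

-- body of the outer `for row … for col …` over the state (ans_val, ans_counter, check)
def cellA (N : Int) (board : List (List Int))
    (st : Int × Int × (Nat → Nat → Bool)) (rc : Nat × Nat) :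
    Int × Int × (Nat → Nat → Bool) :=
  if st.2.2 rc.1 rc.2 then st
  else
    let check1 := chkSet st.2.2 rc.1 rc.2
    let res := bfsA N board (N.toNat * N.toNat + 1) [(rc.1, rc.2)] check1
      (bdGet board rc.1 rc.2) 1
    if res.2.2 > st.2.1 then (res.2.1, res.2.2, res.1)
    else if res.2.2 = st.2.1 then (min st.1 res.2.1, st.2.1, res.1)
    else (st.1, st.2.1, res.1)

def solution (N : Int) (board : List (List Int)) : String :=
  let M := N.toNat   -- range(N) is empty for N ≤ 0
  let cells := (List.range M).flatMap (fun row => (List.range M).map (fun col => (row, col)))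
  let st := cells.foldl (cellA N board) (1, 1, fun _ _ => false)
  PySem.Int.toStr st.1 ++ " " ++ PySem.Int.toStr st.2.1

-- ===== PORT B =====
-- one propagation sweep `for i in range(cells)`: each cell takes the min of
-- its own label and its eligible neighbours' labels (labels are cell indices
-- 0 ≤ i < N*N, so they are kept as Nat; i//N, i%N are Nat / and % here
-- because 0 ≤ i and 0 < N whenever cells > 0)
def relaxB (N : Int) (board : List (List Int)) (lab : List Nat) (i : Nat) : Nat :=
  let M := N.toNat
  let r := i / M
  let c := i % M
  let v := bdGet board r c
  let m0 := lab.getD i 0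
  let m1 := if 0 < r ∧ (v - bdGet board (r - 1) c).natAbs = 1 then
      min m0 (lab.getD (i - M) 0) else m0
  let m2 := if r + 1 < M ∧ (v - bdGet board (r + 1) c).natAbs = 1 then
      min m1 (lab.getD (i + M) 0) else m1
  let m3 := if 0 < c ∧ (v - bdGet board r (c - 1)).natAbs = 1 then
      min m2 (lab.getD (i - 1) 0) else m2
  if c + 1 < M ∧ (v - bdGet board r (c + 1)).natAbs = 1 then
      min m3 (lab.getD (i + 1) 0) else m3

def sweepCellB (N : Int) (board : List (List Int)) (st : List Nat × Bool) (i : Nat) :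
    List Nat × Bool :=
  let m := relaxB N board st.1 i
  if m < st.1.getD i 0 then (st.1.set i m, true) else st

def sweepB (N : Int) (board : List (List Int)) (cells : Nat) (lab : List Nat) :
    List Nat × Bool :=
  (List.range cells).foldl (sweepCellB N board) (lab, false)

-- the `while changed:` loop; fuel makes it structural (each sweep that reports
-- a change strictly decreases the label sum, so cells*cells + 1 sweeps suffice)
def propB (N : Int) (board : List (List Int)) (cells : Nat) :
    Nat → List Nat → List Nat
  | 0, lab => lab
  | fuel + 1, lab =>
    let res := sweepB N board cells lab
    if res.2 then propB N board cells fuel res.1 else res.1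

-- body of the `stats` dict pass
def tallyCellB (N : Int) (board : List (List Int)) (lab : List Nat)
    (d : PySem.Dict Nat (Int × Int)) (i : Nat) : PySem.Dict Nat (Int × Int) :=
  let v := bdGet board (i / N.toNat) (i % N.toNat)
  match d.get? (lab.getD i 0) with
  | some p => d.insert (lab.getD i 0) (p.1 + 1, min p.2 v)
  | none => d.insert (lab.getD i 0) (1, v)

-- body of the final `for sz, mn in stats.values()` selection
def bestB (st : Int × Int) (p : Int × Int) : Int × Int :=
  if p.1 > st.2 ∨ (p.1 = st.2 ∧ p.2 < st.1) then (p.2, p.1) else st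

def solution_alt (N : Int) (board : List (List Int)) : String :=
  let cells : Nat := if 0 < N then (N * N).toNat else 0
  let lab0 : List Nat := List.range cells
  let lab := propB N board cells (cells * cells + 1) lab0
  let stats := (List.range cells).foldl (tallyCellB N board lab) PySem.Dict.empty
  let best := stats.values.foldl bestB (1, 1)
  PySem.Int.toStr best.1 ++ " " ++ PySem.Int.toStr best.2

-- ===== PRECONDITION & SPEC =====
-- Pre_: the board must offer at least N rows of at least N entries each
-- (anything less makes the Python A raise IndexError); nothing else is excluded.
-- The Lean ports read the board through the total getter bdGet, so the proved
-- equivalence does not otherwise depend on this hypothesis.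
def Pre_solution (N : Int) (board : List (List Int)) : Prop :=
  N.toNat ≤ board.length ∧ ∀ row ∈ board.take N.toNat, N.toNat ≤ row.length
instance (N : Int) (board : List (List Int)) : Decidable (Pre_solution N board) := by
  unfold Pre_solution; infer_instance

def pvWitness_solution : Int × List (List Int) := (2, [[1, 2], [5, 9]])

def Spec_solution (N : Int) (board : List (List Int)) (out : String) : Prop := out = solution_alt N board
instance (N : Int) (board : List (List Int)) (out : String) : Decidable (Spec_solution N board out) := by unfold Spec_solution; infer_instance

-- ===== CLAIM (what is proved, stated in full; the proofs are below) =====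
def Claim_equal_solution : Prop := ∀ (N : Int) (board : List (List Int)), Dom_solution N board → Pre_solution N board → Spec_solution N board (solution N board)

-- ===== LEMMAS AND PROOFS =====

-- ================= proof layer: components of the |diff|=1 grid graph =================

def pvInR (M : Nat) (p : Nat × Nat) : Prop := p.1 < M ∧ p.2 < M

def pvE (M : Nat) (b : Nat → Nat → Int) (p q : Nat × Nat) : Prop :=
  pvInR M p ∧ pvInR M q ∧
    ((p.1 = q.1 ∧ (p.2 + 1 = q.2 ∨ q.2 + 1 = p.2)) ∨
     (p.2 = q.2 ∧ (p.1 + 1 = q.1 ∨ q.1 + 1 = p.1))) ∧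
    (b p.1 p.2 - b q.1 q.2).natAbs = 1

def pvReach (M : Nat) (b : Nat → Nat → Int) : Nat × Nat → Nat × Nat → Prop :=
  Relation.ReflTransGen (pvE M b)

theorem pvE_symm (M : Nat) (b : Nat → Nat → Int) : Symmetric (pvE M b) := by
  rintro p q ⟨h1, h2, h3, h4⟩
  exact ⟨h2, h1, by omega, by omega⟩

theorem pvReach_symm (M : Nat) (b : Nat → Nat → Int) : Symmetric (pvReach M b) :=
  Relation.ReflTransGen.symmetric (pvE_symm M b)

theorem pvReach_inR {M : Nat} {b : Nat → Nat → Int} {p q : Nat × Nat}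
    (hp : pvInR M p) (h : pvReach M b p q) : pvInR M q := by
  induction h with
  | refl => exact hp
  | tail _ e _ => exact e.2.1

def pvIdx (M : Nat) (p : Nat × Nat) : Nat := p.1 * M + p.2

def pvCellOf (M : Nat) (i : Nat) : Nat × Nat := (i / M, i % M)

theorem pvIdx_cellOf {M i : Nat} (h : i < M * M) : pvIdx M (pvCellOf M i) = i := by
  simp only [pvIdx, pvCellOf]
  rw [Nat.mul_comm]
  exact Nat.div_add_mod i M

theorem pvCellOf_inR {M i : Nat} (h : i < M * M) : pvInR M (pvCellOf M i) := by
  constructor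
  · exact Nat.div_lt_of_lt_mul (by omega)
  · exact Nat.mod_lt _ (by by_contra hM; simp [Nat.le_zero.mp (Nat.not_lt.mp hM)] at h)

theorem pvIdx_lt {M : Nat} {p : Nat × Nat} (h : pvInR M p) : pvIdx M p < M * M := by
  obtain ⟨h1, h2⟩ := h
  calc p.1 * M + p.2 < p.1 * M + M := by omega
  _ ≤ M * M := by nlinarith

theorem pvCellOf_idx {M : Nat} {p : Nat × Nat} (h : pvInR M p) : pvCellOf M (pvIdx M p) = p := by
  obtain ⟨pa, pb⟩ := p
  obtain ⟨h1, h2⟩ := h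
  have hM : 0 < M := by omega
  simp only [pvIdx, pvCellOf, Prod.mk.injEq]
  constructor
  · rw [Nat.mul_comm, Nat.mul_add_div hM, Nat.div_eq_of_lt h2]; omega
  · exact Nat.mul_add_mod_of_lt h2

-- the component of p, as a finite set
noncomputable def pvComp (M : Nat) (b : Nat → Nat → Int) (p : Nat × Nat) : Finset (Nat × Nat) :=
  @Finset.filter _ (fun q => pvReach M b p q) (fun _ => Classical.propDecidable _)
    (Finset.range M ×ˢ Finset.range M)

theorem pvMem_comp {M : Nat} {b : Nat → Nat → Int} {p q : Nat × Nat} (hp : pvInR M p) :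
    q ∈ pvComp M b p ↔ pvReach M b p q := by
  simp only [pvComp, Finset.mem_filter, Finset.mem_product, Finset.mem_range]
  constructor
  · exact fun h => h.2
  · intro h; exact ⟨by have := pvReach_inR hp h; exact ⟨this.1, this.2⟩, h⟩

-- "v is the minimum board value on p's component"
def pvIsMin (M : Nat) (b : Nat → Nat → Int) (p : Nat × Nat) (v : Int) : Prop :=
  (∃ q, pvReach M b p q ∧ v = b q.1 q.2) ∧ ∀ q, pvReach M b p q → v ≤ b q.1 q.2

theorem pvIsMin_unique {M : Nat} {b : Nat → Nat → Int} {p : Nat × Nat} {v w : Int}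
    (hv : pvIsMin M b p v) (hw : pvIsMin M b p w) : v = w := by
  obtain ⟨⟨q, hq, hv1⟩, hv2⟩ := hv
  obtain ⟨⟨q', hq', hw1⟩, hw2⟩ := hw
  have := hv2 q' hq'
  have := hw2 q hq
  omega

-- "p is the row-major first cell of its component", as a (classical) Bool
noncomputable def pvFirst (M : Nat) (b : Nat → Nat → Int) (i : Nat) : Bool :=
  @decide (∀ q, pvReach M b (pvCellOf M i) q → i ≤ pvIdx M q) (Classical.propDecidable _)

theorem pvFirst_iff {M : Nat} {b : Nat → Nat → Int} {i : Nat} :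
    pvFirst M b i = true ↔ ∀ q, pvReach M b (pvCellOf M i) q → i ≤ pvIdx M q := by
  simp [pvFirst]

-- the canonical contribution list: for each component, in order of its first
-- cell, the pair (size, min value); plus the canonical answer
noncomputable def pvCanon (M : Nat) (b : Nat → Nat → Int) : List (Int × Int) :=
  ((List.range (M * M)).filter (pvFirst M b)).map
    (fun i => (((pvComp M b (pvCellOf M i)).card : Int),
      ((pvComp M b (pvCellOf M i)).image (fun q => b q.1 q.2)).min.getD 0))

theorem pvCompMin_isMin {M : Nat} {b : Nat → Nat → Int} {p : Nat × Nat} (hp : pvInR M p) :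
    pvIsMin M b p (((pvComp M b p).image (fun q => b q.1 q.2)).min.getD 0) := by
  have hne : ((pvComp M b p).image (fun q => b q.1 q.2)).Nonempty := by
    refine ⟨b p.1 p.2, Finset.mem_image.mpr ⟨p, ?_, rfl⟩⟩
    exact (pvMem_comp hp).mpr Relation.ReflTransGen.refl
  obtain ⟨m, hm⟩ := Finset.min_of_nonempty hne
  rw [hm]
  constructor
  · have := Finset.mem_of_min hm
    obtain ⟨q, hq, hv⟩ := Finset.mem_image.mp this
    exact ⟨q, (pvMem_comp hp).mp hq, by rw [hv]; rfl⟩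
  · intro q hq
    have : b q.1 q.2 ∈ (pvComp M b p).image (fun q => b q.1 q.2) :=
      Finset.mem_image.mpr ⟨q, (pvMem_comp hp).mpr hq, rfl⟩
    have := Finset.min_le_of_eq  this hm
    simpa using this

-- ================= B-side: label propagation reaches the component minima =================

theorem pvCellOf_mk {M a c : Nat} (hc : c < M) : pvCellOf M (a * M + c) = (a, c) := by
  have hM : 0 < M := by omega
  simp only [pvCellOf, Prod.mk.injEq]
  constructor
  · rw [Nat.mul_comm, Nat.mul_add_div hM, Nat.div_eq_of_lt hc]; omega
  · exact Nat.mul_add_mod_of_lt hc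

-- one guarded relaxation step (proof-layer view of the min-chain in relaxB)
def pvUpd (m c : Nat) (g : Prop) [Decidable g] : Nat := if g then min m c else m

theorem pvUpd_le (m c : Nat) (g : Prop) [Decidable g] : pvUpd m c g ≤ m := by
  simp only [pvUpd]; split_ifs <;> omega

theorem pvUpd_le_cand {m c : Nat} {g : Prop} [Decidable g] (h : g) : pvUpd m c g ≤ c := by
  simp only [pvUpd, if_pos h]; omega

theorem relaxB_eq (N : Int) (board : List (List Int)) (lab : List Nat) (i : Nat) :
    relaxB N board lab i =
      pvUpd (pvUpd (pvUpd (pvUpd (lab.getD i 0)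
        (lab.getD (i - N.toNat) 0)
          (0 < i / N.toNat ∧ (bdGet board (i / N.toNat) (i % N.toNat) - bdGet board (i / N.toNat - 1) (i % N.toNat)).natAbs = 1))
        (lab.getD (i + N.toNat) 0)
          (i / N.toNat + 1 < N.toNat ∧ (bdGet board (i / N.toNat) (i % N.toNat) - bdGet board (i / N.toNat + 1) (i % N.toNat)).natAbs = 1))
        (lab.getD (i - 1) 0)
          (0 < i % N.toNat ∧ (bdGet board (i / N.toNat) (i % N.toNat) - bdGet board (i / N.toNat) (i % N.toNat - 1)).natAbs = 1))
        (lab.getD (i + 1) 0)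
          (i % N.toNat + 1 < N.toNat ∧ (bdGet board (i / N.toNat) (i % N.toNat) - bdGet board (i / N.toNat) (i % N.toNat + 1)).natAbs = 1) := by
  simp [relaxB, pvUpd]

-- arithmetic facts shared by the four edge lemmas
theorem pvDM {M i : Nat} (hi : i < M * M) :
    0 < M ∧ i / M < M ∧ i % M < M ∧ i / M * M + i % M = i := by
  have hM : 0 < M := by
    rcases Nat.eq_zero_or_pos M with h | h
    · subst h; simp at hi
    · exact h
  exact ⟨hM, Nat.div_lt_of_lt_mul hi, Nat.mod_lt _ hM, Nat.div_add_mod' i M⟩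

-- the four guards, read as graph edges
theorem pvEdgeU {M : Nat} {bd : Nat → Nat → Int} {i : Nat} (hi : i < M * M)
    (h : 0 < i / M ∧ (bd (i / M) (i % M) - bd (i / M - 1) (i % M)).natAbs = 1) :
    i - M < M * M ∧ pvE M bd (pvCellOf M i) (pvCellOf M (i - M)) := by
  obtain ⟨hg, hv⟩ := h
  obtain ⟨hM, h1, h2, hd⟩ := pvDM hi
  have hsub : i - M = (i / M - 1) * M + i % M := by
    rw [Nat.sub_mul, one_mul]
    have hle : 1 * M ≤ i / M * M := Nat.mul_le_mul_right M hg
    rw [one_mul] at hle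
    generalize i / M * M = A at hd hle
    omega
  have hcell : pvCellOf M (i - M) = (i / M - 1, i % M) := by rw [hsub, pvCellOf_mk h2]
  have hci : pvCellOf M i = (i / M, i % M) := rfl
  refine ⟨by omega, ?_⟩
  rw [hcell, hci]
  exact ⟨⟨h1, h2⟩, ⟨by omega, h2⟩, Or.inr ⟨rfl, Or.inr (by omega)⟩, hv⟩

theorem pvEdgeD {M : Nat} {bd : Nat → Nat → Int} {i : Nat} (hi : i < M * M)
    (h : i / M + 1 < M ∧ (bd (i / M) (i % M) - bd (i / M + 1) (i % M)).natAbs = 1) :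
    i + M < M * M ∧ pvE M bd (pvCellOf M i) (pvCellOf M (i + M)) := by
  obtain ⟨hg, hv⟩ := h
  obtain ⟨hM, h1, h2, hd⟩ := pvDM hi
  have hadd : i + M = (i / M + 1) * M + i % M := by
    rw [Nat.add_mul, one_mul]
    generalize i / M * M = A at hd
    omega
  have hcell : pvCellOf M (i + M) = (i / M + 1, i % M) := by rw [hadd, pvCellOf_mk h2]
  have hci : pvCellOf M i = (i / M, i % M) := rfl
  have hb : (i / M + 2) * M ≤ M * M := Nat.mul_le_mul_right M (by omega)
  have hb2 : i + M < M * M := by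
    rw [Nat.add_mul] at hb
    have e2 : 2 * M = M + M := by ring
    generalize i / M * M = A at hd hb
    omega
  refine ⟨hb2, ?_⟩
  rw [hcell, hci]
  exact ⟨⟨h1, h2⟩, ⟨hg, h2⟩, Or.inr ⟨rfl, Or.inl rfl⟩, hv⟩

theorem pvEdgeL {M : Nat} {bd : Nat → Nat → Int} {i : Nat} (hi : i < M * M)
    (h : 0 < i % M ∧ (bd (i / M) (i % M) - bd (i / M) (i % M - 1)).natAbs = 1) :
    i - 1 < M * M ∧ pvE M bd (pvCellOf M i) (pvCellOf M (i - 1)) := by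
  obtain ⟨hg, hv⟩ := h
  obtain ⟨hM, h1, h2, hd⟩ := pvDM hi
  have hsub : i - 1 = i / M * M + (i % M - 1) := by
    generalize i / M * M = A at hd
    omega
  have hcell : pvCellOf M (i - 1) = (i / M, i % M - 1) := by rw [hsub, pvCellOf_mk (by omega)]
  have hci : pvCellOf M i = (i / M, i % M) := rfl
  refine ⟨by omega, ?_⟩
  rw [hcell, hci]
  exact ⟨⟨h1, h2⟩, ⟨h1, by omega⟩, Or.inl ⟨rfl, Or.inr (by omega)⟩, hv⟩

theorem pvEdgeR {M : Nat} {bd : Nat → Nat → Int} {i : Nat} (hi : i < M * M)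
    (h : i % M + 1 < M ∧ (bd (i / M) (i % M) - bd (i / M) (i % M + 1)).natAbs = 1) :
    i + 1 < M * M ∧ pvE M bd (pvCellOf M i) (pvCellOf M (i + 1)) := by
  obtain ⟨hg, hv⟩ := h
  obtain ⟨hM, h1, h2, hd⟩ := pvDM hi
  have hadd : i + 1 = i / M * M + (i % M + 1) := by
    generalize i / M * M = A at hd
    omega
  have hcell : pvCellOf M (i + 1) = (i / M, i % M + 1) := by rw [hadd, pvCellOf_mk hg]
  have hci : pvCellOf M i = (i / M, i % M) := rfl
  have hb : (i / M + 1) * M ≤ M * M := Nat.mul_le_mul_right M (by omega)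
  have hb2 : i + 1 < M * M := by
    rw [Nat.add_mul, one_mul] at hb
    generalize i / M * M = A at hd hb
    omega
  refine ⟨hb2, ?_⟩
  rw [hcell, hci]
  exact ⟨⟨h1, h2⟩, ⟨h1, hg⟩, Or.inl ⟨rfl, Or.inl rfl⟩, hv⟩

-- every edge out of cell i fires one of the four guards
theorem pvEdge_cover {M : Nat} {bd : Nat → Nat → Int} {i : Nat} {q : Nat × Nat}
    (hi : i < M * M)
    (h : pvE M bd (pvCellOf M i) q) :
    (pvIdx M q = i - M ∧ 0 < i / M ∧ (bd (i / M) (i % M) - bd (i / M - 1) (i % M)).natAbs = 1) ∨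
    (pvIdx M q = i + M ∧ i / M + 1 < M ∧ (bd (i / M) (i % M) - bd (i / M + 1) (i % M)).natAbs = 1) ∨
    (pvIdx M q = i - 1 ∧ 0 < i % M ∧ (bd (i / M) (i % M) - bd (i / M) (i % M - 1)).natAbs = 1) ∨
    (pvIdx M q = i + 1 ∧ i % M + 1 < M ∧ (bd (i / M) (i % M) - bd (i / M) (i % M + 1)).natAbs = 1) := by
  obtain ⟨hM, hr, hc, hd⟩ := pvDM hi
  obtain ⟨q1, q2⟩ := q
  obtain ⟨hp, ⟨hq1, hq2⟩, hgeo, hval⟩ := h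
  simp only [pvCellOf] at hgeo hval
  simp only [pvIdx]
  rcases hgeo with ⟨he, hor⟩ | ⟨he, hor⟩
  · -- same row: i / M = q1
    rcases hor with h2 | h2
    · right; right; right
      refine ⟨?_, by omega, by rw [← he, ← h2] at hval; exact hval⟩
      rw [← he]
      generalize i / M * M = A at hd
      omega
    · right; right; left
      refine ⟨?_, by omega, ?_⟩
      · rw [← he]
        generalize i / M * M = A at hd
        omega
      · have hq2e : q2 = i % M - 1 := by omega
        rw [← he, hq2e] at hval; exact hval
  · -- same column: i % M = q2
    rcases hor with h2 | h2
    · right; left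
      refine ⟨?_, by omega, by rw [← he, ← h2] at hval; exact hval⟩
      rw [← h2, Nat.add_mul, one_mul]
      generalize i / M * M = A at hd
      omega
    · left
      have e : (q1 + 1) * M = q1 * M + M := by ring
      rw [h2] at e
      refine ⟨?_, by omega, ?_⟩
      · generalize i / M * M = A at hd e
        omega
      · have hq1e : q1 = i / M - 1 := by omega
        rw [← he, hq1e] at hval; exact hval

-- B-side invariant: every label is the index of a reachable cell, and ≤ its own index
def pvGood (N : Int) (board : List (List Int)) (lab : List Nat) : Prop :=
  lab.length = N.toNat * N.toNat ∧
  ∀ i, i < N.toNat * N.toNat →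
    lab.getD i 0 ≤ i ∧
    pvReach N.toNat (bdGet board) (pvCellOf N.toNat i) (pvCellOf N.toNat (lab.getD i 0))

-- ================= B-side: the sweep loop and its fixpoint =================

theorem pvGetD_set (l : List Nat) (i j v : Nat) :
    (l.set i v).getD j 0 = if i = j ∧ i < l.length then v else l.getD j 0 := by
  simp only [List.getD_eq_getElem?_getD, List.getElem?_set]
  split_ifs with h1 h2 h3 <;> simp_all <;> omega

theorem pvSum_set_lt (l : List Nat) (i v : Nat) (hi : i < l.length) (hv : v < l.getD i 0) :
    (l.set i v).sum < l.sum := by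
  induction l generalizing i with
  | nil => simp at hi
  | cons a t ih =>
    cases i with
    | zero => simp [List.getD] at hv ⊢; omega
    | succ n =>
      simp only [List.set, List.sum_cons]
      have := ih n (by simpa using hi) (by simpa [List.getD] using hv)
      omega

theorem pvUpd_value (m c : Nat) (g : Prop) [Decidable g] (P : Nat → Prop)
    (hm : P m) (hc : g → P c) : P (pvUpd m c g) := by
  simp only [pvUpd]
  split_ifs with hg
  · rcases min_choice m c with h | h <;> rw [h]
    · exact hm
    · exact hc hg
  · exact hm

-- its value is the label of some cell reachable from i
theorem relaxB_value (N : Int) (board : List (List Int)) (lab : List Nat) (i : Nat)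
    (hi : i < N.toNat * N.toNat) :
    ∃ j, j < N.toNat * N.toNat ∧
      pvReach N.toNat (bdGet board) (pvCellOf N.toNat i) (pvCellOf N.toNat j) ∧
      relaxB N board lab i = lab.getD j 0 := by
  rw [relaxB_eq]
  refine pvUpd_value _ _ _ (fun v => ∃ j, j < N.toNat * N.toNat ∧ pvReach N.toNat (bdGet board) (pvCellOf N.toNat i) (pvCellOf N.toNat j) ∧ v = lab.getD j 0) ?_ (fun g4 => ⟨i + 1, (pvEdgeR hi g4).1,
    Relation.ReflTransGen.single (pvEdgeR hi g4).2, rfl⟩)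
  refine pvUpd_value _ _ _ (fun v => ∃ j, j < N.toNat * N.toNat ∧ pvReach N.toNat (bdGet board) (pvCellOf N.toNat i) (pvCellOf N.toNat j) ∧ v = lab.getD j 0) ?_ (fun g3 => ⟨i - 1, (pvEdgeL hi g3).1,
    Relation.ReflTransGen.single (pvEdgeL hi g3).2, rfl⟩)
  refine pvUpd_value _ _ _ (fun v => ∃ j, j < N.toNat * N.toNat ∧ pvReach N.toNat (bdGet board) (pvCellOf N.toNat i) (pvCellOf N.toNat j) ∧ v = lab.getD j 0) ?_ (fun g2 => ⟨i + N.toNat, (pvEdgeD hi g2).1,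
    Relation.ReflTransGen.single (pvEdgeD hi g2).2, rfl⟩)
  exact pvUpd_value _ _ _ (fun v => ∃ j, j < N.toNat * N.toNat ∧ pvReach N.toNat (bdGet board) (pvCellOf N.toNat i) (pvCellOf N.toNat j) ∧ v = lab.getD j 0) ⟨i, hi, Relation.ReflTransGen.refl, rfl⟩
    (fun g1 => ⟨i - N.toNat, (pvEdgeU hi g1).1,
      Relation.ReflTransGen.single (pvEdgeU hi g1).2, rfl⟩)

-- it is bounded by every neighbour's label
theorem relaxB_le_edge (N : Int) (board : List (List Int)) (lab : List Nat) (i : Nat)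
    (hi : i < N.toNat * N.toNat) (q : Nat × Nat)
    (hq : pvE N.toNat (bdGet board) (pvCellOf N.toNat i) q) :
    relaxB N board lab i ≤ lab.getD (pvIdx N.toNat q) 0 := by
  rw [relaxB_eq]
  rcases pvEdge_cover hi hq with ⟨hidx, hg⟩ | ⟨hidx, hg⟩ | ⟨hidx, hg⟩ | ⟨hidx, hg⟩ <;> rw [hidx]
  · exact le_trans (pvUpd_le _ _ _) (le_trans (pvUpd_le _ _ _)
      (le_trans (pvUpd_le _ _ _) (pvUpd_le_cand hg)))
  · exact le_trans (pvUpd_le _ _ _) (le_trans (pvUpd_le _ _ _) (pvUpd_le_cand hg))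
  · exact le_trans (pvUpd_le _ _ _) (pvUpd_le_cand hg)
  · exact pvUpd_le_cand hg

-- one sweep step: all the facts the fold induction needs
theorem sweepCellB_spec (N : Int) (board : List (List Int)) (st : List Nat × Bool) (i : Nat)
    (hi : i < N.toNat * N.toNat) (hgood : pvGood N board st.1) :
    pvGood N board (sweepCellB N board st i).1 ∧
    (sweepCellB N board st i).1.sum ≤ st.1.sum ∧
    (st.2 = true → (sweepCellB N board st i).2 = true) ∧
    ((sweepCellB N board st i).2 = false →
      sweepCellB N board st i = st ∧ st.1.getD i 0 ≤ relaxB N board st.1 i) ∧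
    ((sweepCellB N board st i).2 = true → st.2 = true ∨ (sweepCellB N board st i).1.sum < st.1.sum) := by
  obtain ⟨hlen, hinv⟩ := hgood
  simp only [sweepCellB]
  split_ifs with hlt
  · -- a strict improvement: set i
    dsimp only
    obtain ⟨j, hj, hreach, hval⟩ := relaxB_value N board st.1 i hi
    have hilen : i < st.1.length := by omega
    have hsum : (st.1.set i (relaxB N board st.1 i)).sum < st.1.sum :=
      pvSum_set_lt _ _ _ hilen hlt
    refine ⟨⟨by simpa using hlen, ?_⟩, le_of_lt hsum, by simp, by simp, fun _ => Or.inr hsum⟩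
    intro k hk
    rw [pvGetD_set]
    split_ifs with hik
    · obtain ⟨hik', _⟩ := hik
      subst hik'
      constructor
      · have := (hinv i hi).1
        omega
      · rw [hval]
        exact Relation.ReflTransGen.trans hreach (hinv j hj).2
    · exact hinv k hk
  · exact ⟨⟨hlen, hinv⟩, le_refl _, fun h => h, fun _ => ⟨rfl, by omega⟩, by simp_all⟩

-- the whole sweep (fold over any index list inside the grid)
theorem sweepFoldB (N : Int) (board : List (List Int)) (l : List Nat) :
    ∀ st, pvGood N board st.1 → (∀ i ∈ l, i < N.toNat * N.toNat) →
    pvGood N board (l.foldl (sweepCellB N board) st).1 ∧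
    (l.foldl (sweepCellB N board) st).1.sum ≤ st.1.sum ∧
    (st.2 = true → (l.foldl (sweepCellB N board) st).2 = true) ∧
    ((l.foldl (sweepCellB N board) st).2 = false →
      l.foldl (sweepCellB N board) st = st ∧
      ∀ i ∈ l, st.1.getD i 0 ≤ relaxB N board st.1 i) ∧
    ((l.foldl (sweepCellB N board) st).2 = true →
      st.2 = true ∨ (l.foldl (sweepCellB N board) st).1.sum < st.1.sum) := by
  induction l with
  | nil => intro st hgood _; exact ⟨hgood, le_refl _, fun h => h, fun _ => ⟨rfl, by simp⟩, fun h => Or.inl h⟩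
  | cons a t ih =>
    intro st hgood hmem
    have ha : a < N.toNat * N.toNat := hmem a (by simp)
    obtain ⟨g1, s1, m1, f1, t1⟩ := sweepCellB_spec N board st a ha hgood
    obtain ⟨g2, s2, m2, f2, t2⟩ := ih (sweepCellB N board st a) g1 (fun i hi => hmem i (by simp [hi]))
    simp only [List.foldl_cons]
    refine ⟨g2, le_trans s2 s1, fun h => m2 (m1 h), ?_, ?_⟩
    · intro hfalse
      obtain ⟨heq, hfix⟩ := f2 hfalse
      have hafalse : (sweepCellB N board st a).2 = false := by
        by_contra hb
        have hbt : (sweepCellB N board st a).2 = true := by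
          revert hb; cases (sweepCellB N board st a).2 <;> simp
        rw [m2 hbt] at hfalse
        cases hfalse
      obtain ⟨heq2, hle⟩ := f1 hafalse
      rw [heq2] at hfix
      refine ⟨heq.trans heq2, ?_⟩
      intro i hi
      rcases List.mem_cons.mp hi with h | h
      · subst h; exact hle
      · exact hfix i h
    · intro htrue
      rcases t2 htrue with h | h
      · rcases t1 h with h' | h'
        · exact Or.inl h'
        · exact Or.inr (by omega)
      · exact Or.inr (by omega)

-- ================= B-side: the while-loop reaches a stable labelling =================

def pvFix (N : Int) (board : List (List Int)) (lab : List Nat) : Prop :=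
  ∀ i, i < N.toNat * N.toNat → lab.getD i 0 ≤ relaxB N board lab i

theorem propB_fix (N : Int) (board : List (List Int)) :
    ∀ (fuel : Nat) (lab : List Nat), pvGood N board lab → lab.sum < fuel →
      pvGood N board (propB N board (N.toNat * N.toNat) fuel lab) ∧
      pvFix N board (propB N board (N.toNat * N.toNat) fuel lab) := by
  intro fuel
  induction fuel with
  | zero => intro lab _ h; omega
  | succ fuel ih =>
    intro lab hgood hsum
    obtain ⟨g1, s1, _, ffalse, ftrue⟩ := sweepFoldB N board
      (List.range (N.toNat * N.toNat)) (lab, false) hgood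
      (fun i hi => List.mem_range.mp hi)
    show pvGood N board (propB N board (N.toNat * N.toNat) (fuel + 1) lab) ∧ _
    rw [propB]
    rcases hb : (sweepB N board (N.toNat * N.toNat) lab).2 with hf | ht
    · -- no change: fixpoint reached
      simp only [hb, if_neg Bool.false_ne_true]
      obtain ⟨heq, hfix⟩ := ffalse hb
      have h1 : (sweepB N board (N.toNat * N.toNat) lab).1 = lab := by
        rw [show sweepB N board (N.toNat * N.toNat) lab =
          (List.range (N.toNat * N.toNat)).foldl (sweepCellB N board) (lab, false) from rfl, heq]
      rw [h1]
      exact ⟨hgood, fun i hi => hfix i (List.mem_range.mpr hi)⟩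
    · -- a change: the label sum went strictly down
      simp only [if_pos rfl]
      have hlt : (sweepB N board (N.toNat * N.toNat) lab).1.sum < lab.sum := by
        rcases ftrue hb with h | h
        · cases h
        · exact h
      exact ih _ g1 (by omega)

-- ================= B-side: the stable labelling names each component's first cell =================

theorem pvKey_edge (N : Int) (board : List (List Int)) (lab : List Nat)
    (hgood : pvGood N board lab) (hfix : pvFix N board lab)
    {p q : Nat × Nat} (h : pvE N.toNat (bdGet board) p q) :
    lab.getD (pvIdx N.toNat p) 0 ≤ lab.getD (pvIdx N.toNat q) 0 := by
  have hp : pvInR N.toNat p := h.1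
  have hi : pvIdx N.toNat p < N.toNat * N.toNat := pvIdx_lt hp
  have hcell : pvCellOf N.toNat (pvIdx N.toNat p) = p := pvCellOf_idx hp
  have h1 := hfix _ hi
  have h2 := relaxB_le_edge N board lab (pvIdx N.toNat p) hi q (by rw [hcell]; exact h)
  omega

theorem pvKey_reach (N : Int) (board : List (List Int)) (lab : List Nat)
    (hgood : pvGood N board lab) (hfix : pvFix N board lab)
    {p q : Nat × Nat} (h : pvReach N.toNat (bdGet board) p q) :
    lab.getD (pvIdx N.toNat p) 0 = lab.getD (pvIdx N.toNat q) 0 := by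
  induction h with
  | refl => rfl
  | tail _ e ihe =>
    have h1 := pvKey_edge N board lab hgood hfix e
    have h2 := pvKey_edge N board lab hgood hfix (pvE_symm _ _ e)
    omega

theorem pvKey_first_iff (N : Int) (board : List (List Int)) (lab : List Nat)
    (hgood : pvGood N board lab) (hfix : pvFix N board lab)
    {i : Nat} (hi : i < N.toNat * N.toNat) :
    lab.getD i 0 = i ↔
      ∀ q, pvReach N.toNat (bdGet board) (pvCellOf N.toNat i) q → i ≤ pvIdx N.toNat q := by
  constructor
  · intro hfixed q hq
    have hq' : pvInR N.toNat q := pvReach_inR (pvCellOf_inR hi) hq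
    have := pvKey_reach N board lab hgood hfix hq
    rw [pvIdx_cellOf hi] at this
    have := (hgood.2 (pvIdx N.toNat q) (pvIdx_lt hq')).1
    omega
  · intro hmin
    have h1 := (hgood.2 i hi).1
    have h2 := (hgood.2 i hi).2
    have h3 := hmin _ h2
    rw [pvIdx_cellOf (by omega)] at h3
    omega

theorem pvKey_label_iff (N : Int) (board : List (List Int)) (lab : List Nat)
    (hgood : pvGood N board lab) (hfix : pvFix N board lab)
    {i L : Nat} (hi : i < N.toNat * N.toNat) (hL : L < N.toNat * N.toNat)
    (hLfix : lab.getD L 0 = L) :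
    lab.getD i 0 = L ↔ pvReach N.toNat (bdGet board) (pvCellOf N.toNat L) (pvCellOf N.toNat i) := by
  constructor
  · intro h
    have hr := (hgood.2 i hi).2
    rw [h] at hr
    exact pvReach_symm _ _ hr
  · intro h
    have := pvKey_reach N board lab hgood hfix h
    rw [pvIdx_cellOf hL, pvIdx_cellOf hi, hLfix] at this
    omega

-- ================= B-side: the stats dict, described explicitly =================

-- (count, running min) of the cells among 0..k-1 carrying label L
def pvAgg (N : Int) (board : List (List Int)) (lab : List Nat) (k L : Nat) : Int × Int :=
  match (List.range k).filter (fun i => lab.getD i 0 == L) with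
  | [] => (0, 0)
  | j :: js => ((js.length : Int) + 1,
      js.foldl (fun m i => min m (bdGet board (i / N.toNat) (i % N.toNat)))
        (bdGet board (j / N.toNat) (j % N.toNat)))

theorem pvAgg_stable (N : Int) (board : List (List Int)) (lab : List Nat) (k L : Nat)
    (h : lab.getD k 0 ≠ L) :
    pvAgg N board lab (k + 1) L = pvAgg N board lab k L := by
  simp only [pvAgg, List.range_succ, List.filter_append]
  rw [List.filter_cons_of_neg (by simpa using h), List.filter_nil, List.append_nil]

theorem pvAgg_fresh (N : Int) (board : List (List Int)) (lab : List Nat) (k : Nat)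
    (hk : lab.getD k 0 = k) (hlt : ∀ i, i < k → lab.getD i 0 ≠ k) :
    pvAgg N board lab (k + 1) k = (1, bdGet board (k / N.toNat) (k % N.toNat)) := by
  have hfk : (List.range k).filter (fun i => lab.getD i 0 == k) = [] := by
    rw [List.filter_eq_nil_iff]
    intro i hi
    simp only [beq_iff_eq]
    exact hlt i (List.mem_range.mp hi)
  simp only [pvAgg, List.range_succ, List.filter_append, hfk]
  rw [List.filter_cons_of_pos (by simpa using hk), List.filter_nil, List.nil_append]
  simp

theorem pvAgg_step (N : Int) (board : List (List Int)) (lab : List Nat) (k L : Nat)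
    (hk : lab.getD k 0 = L)
    (hne : (List.range k).filter (fun i => lab.getD i 0 == L) ≠ []) :
    pvAgg N board lab (k + 1) L =
      ((pvAgg N board lab k L).1 + 1,
        min (pvAgg N board lab k L).2 (bdGet board (k / N.toNat) (k % N.toNat))) := by
  simp only [pvAgg, List.range_succ, List.filter_append]
  rw [List.filter_cons_of_pos (by simpa using hk), List.filter_nil]
  rcases hf : (List.range k).filter (fun i => lab.getD i 0 == L) with _ | ⟨j, js⟩
  · exact absurd hf hne
  · simp only [List.cons_append]
    simp only [List.foldl_append, List.foldl_cons, List.foldl_nil, List.length_append,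
      List.length_cons, List.length_nil]
    exact Prod.ext (by push_cast; ring) rfl

-- the stats dict after processing cells 0..k-1
theorem pvTally_items (N : Int) (board : List (List Int)) (lab : List Nat)
    (hgood : pvGood N board lab) (hfix : pvFix N board lab) :
    ∀ k, k ≤ N.toNat * N.toNat →
      ((List.range k).foldl (tallyCellB N board lab) PySem.Dict.empty).items =
        ((List.range k).filter (fun L => lab.getD L 0 == L)).map
          (fun L => (L, pvAgg N board lab k L)) := by
  intro k
  induction k with
  | zero => intro _; simp [PySem.Dict.empty]
  | succ k ih =>
    intro hk1
    have hk : k < N.toNat * N.toNat := by omega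
    have ihh := ih (by omega)
    -- facts about the step
    have hkey_le : lab.getD k 0 ≤ k := (hgood.2 k hk).1
    have hkey_idem : lab.getD (lab.getD k 0) 0 = lab.getD k 0 := by
      have hr := (hgood.2 k hk).2
      have := pvKey_reach N board lab hgood hfix hr
      rw [pvIdx_cellOf hk, pvIdx_cellOf (by omega)] at this
      omega
    have hkeys : ((List.range k).foldl (tallyCellB N board lab) PySem.Dict.empty).keys =
        (List.range k).filter (fun L => lab.getD L 0 == L) := by
      show (((List.range k).foldl (tallyCellB N board lab) PySem.Dict.empty).items.map Prod.fst) = _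
      rw [ihh, List.map_map]
      have he : (Prod.fst ∘ fun L => (L, pvAgg N board lab k L)) = id := rfl
      rw [he, List.map_id]
    have hnodup : ((List.range k).foldl (tallyCellB N board lab) PySem.Dict.empty).keys.Nodup := by
      rw [hkeys]
      exact List.nodup_range.filter _
    rw [List.range_succ, List.foldl_append, List.foldl_cons, List.foldl_nil,
      List.filter_append, List.filter_cons, List.filter_nil]
    by_cases hfixk : lab.getD k 0 = k
    · -- a fresh key k
      have hmem : ¬ k ∈ ((List.range k).foldl (tallyCellB N board lab) PySem.Dict.empty).keys := by
        rw [hkeys]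
        intro hmem
        have := List.mem_range.mp (List.mem_of_mem_filter hmem)
        omega
      have hget : ((List.range k).foldl (tallyCellB N board lab) PySem.Dict.empty).get?
          (lab.getD k 0) = none := by
        rw [hfixk]
        exact (PySem.Dict.get?_eq_none_iff_not_mem_keys _ _).mpr hmem
      have hcont : ((List.range k).foldl (tallyCellB N board lab) PySem.Dict.empty).contains
          (lab.getD k 0) = false := by
        rw [hfixk]
        rw [PySem.Dict.contains_eq_decide_mem_keys]
        simpa using hmem
      simp only [tallyCellB, hget]
      rw [PySem.Dict.items_insert_of_not_contains _ _ hcont, ihh, hfixk]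
      simp only [beq_self_eq_true, if_pos]
      rw [List.map_append]
      congr 1
      · -- old entries unchanged
        apply List.map_congr_left
        intro L hL
        have hLk : L < k := List.mem_range.mp (List.mem_of_mem_filter hL)
        rw [pvAgg_stable N board lab k L (by omega)]
      · -- the new entry
        simp only [List.map_cons, List.map_nil]
        rw [pvAgg_fresh N board lab k hfixk]
        intro i hi
        have := (hgood.2 i (by omega)).1
        omega
    · -- key L = lab[k] already present
      have hL : lab.getD k 0 < k := by omega
      have hLmem : lab.getD k 0 ∈ (List.range k).filter (fun L => lab.getD L 0 == L) := by
        rw [List.mem_filter]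
        exact ⟨List.mem_range.mpr hL, by simpa using hkey_idem⟩
      have hitem : (lab.getD k 0, pvAgg N board lab k (lab.getD k 0)) ∈
          ((List.range k).foldl (tallyCellB N board lab) PySem.Dict.empty).items := by
        rw [ihh]
        exact List.mem_map.mpr ⟨lab.getD k 0, hLmem, rfl⟩
      have hget := PySem.Dict.get?_of_mem_items _ hitem hnodup
      have hcont : ((List.range k).foldl (tallyCellB N board lab) PySem.Dict.empty).contains
          (lab.getD k 0) = true := by
        rw [PySem.Dict.contains_eq_decide_mem_keys]
        simp only [decide_eq_true_eq]
        rw [hkeys]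
        exact hLmem
      simp only [tallyCellB, hget]
      rw [PySem.Dict.items_insert_of_contains _ _ hcont, ihh]
      have hnofilt : (if lab.getD k 0 == k then [k] else []) = ([] : List Nat) := by
        simp only [beq_iff_eq]
        exact if_neg hfixk
      rw [hnofilt, List.append_nil, List.map_map]
      apply List.map_congr_left
      intro L hL'
      have hLk : L < k := List.mem_range.mp (List.mem_of_mem_filter hL')
      have hLfix : lab.getD L 0 = L := by
        have := (List.mem_filter.mp hL').2
        simpa using this
      simp only [Function.comp]
      by_cases hLL : L = lab.getD k 0
      · have hbeq : (L == lab.getD k 0) = true := by simpa using hLL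
        rw [hbeq]
        simp only [if_pos]
        have hne : (List.range k).filter (fun i => lab.getD i 0 == lab.getD k 0) ≠ [] := by
          intro hnil
          have hmm : lab.getD k 0 ∈ (List.range k).filter (fun i => lab.getD i 0 == lab.getD k 0) := by
            rw [List.mem_filter]
            exact ⟨List.mem_range.mpr hL, by simpa using hkey_idem⟩
          rw [hnil] at hmm
          cases hmm
        rw [hLL, pvAgg_step N board lab k (lab.getD k 0) rfl hne]
      · have hbeq : (L == lab.getD k 0) = false := by simpa using hLL
        rw [hbeq]
        simp only [Bool.false_eq_true, if_false]
        rw [pvAgg_stable N board lab k L (by omega)]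

-- ================= B-side: solution_alt computes the canonical fold =================

theorem pvCells_eq (N : Int) : (if 0 < N then (N * N).toNat else 0) = N.toNat * N.toNat := by
  split_ifs with h
  · have hN : N = (N.toNat : Int) := (Int.toNat_of_nonneg (by omega)).symm
    rw [hN]
    push_cast
    exact Int.toNat_natCast _
  · have : N.toNat = 0 := by omega
    rw [this]

theorem pvSum_range_le (n : Nat) : (List.range n).sum ≤ n * n := by
  induction n with
  | zero => simp
  | succ n ih =>
    rw [List.range_succ, List.sum_append]
    have e : (n + 1) * (n + 1) = n * n + 2 * n + 1 := by ring
    simp only [List.sum_cons, List.sum_nil]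
    omega

theorem pvGood_range (N : Int) (board : List (List Int)) :
    pvGood N board (List.range (N.toNat * N.toNat)) := by
  refine ⟨List.length_range, ?_⟩
  intro i hi
  have hg : (List.range (N.toNat * N.toNat)).getD i 0 = i := by
    rw [List.getD_eq_getElem?_getD, List.getElem?_range hi]
    rfl
  rw [hg]
  exact ⟨le_refl _, Relation.ReflTransGen.refl⟩

theorem pvFoldMin_le_init (f : Nat → Int) (l : List Nat) (a : Int) :
    l.foldl (fun m i => min m (f i)) a ≤ a := by
  induction l generalizing a with
  | nil => simp
  | cons x t ih => exact le_trans (ih _) (by simp)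

theorem pvFoldMin_le (f : Nat → Int) (l : List Nat) (a : Int) (x : Nat) (hx : x ∈ l) :
    l.foldl (fun m i => min m (f i)) a ≤ f x := by
  induction l generalizing a with
  | nil => cases hx
  | cons y t ih =>
    rcases List.mem_cons.mp hx with h | h
    · subst h
      exact le_trans (pvFoldMin_le_init f t _) (by simp)
    · exact ih _ h

theorem pvFoldMin_mem (f : Nat → Int) (l : List Nat) (a : Int) :
    l.foldl (fun m i => min m (f i)) a = a ∨ ∃ j ∈ l, l.foldl (fun m i => min m (f i)) a = f j := by
  induction l generalizing a with
  | nil => simp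
  | cons x t ih =>
    simp only [List.foldl_cons]
    rcases ih (min a (f x)) with h | ⟨j, hj, h⟩
    · rw [h]
      rcases min_choice a (f x) with h' | h' <;> rw [h']
      · exact Or.inl rfl
      · exact Or.inr ⟨x, by simp, rfl⟩
    · exact Or.inr ⟨j, by simp [hj], h⟩

-- member description of the filtered index list
theorem pvFilt_mem (N : Int) (board : List (List Int)) (lab : List Nat)
    (hgood : pvGood N board lab) (hfix : pvFix N board lab)
    (L : Nat) (hL : L < N.toNat * N.toNat) (hLfix : lab.getD L 0 = L) (i : Nat) :
    i ∈ (List.range (N.toNat * N.toNat)).filter (fun i => lab.getD i 0 == L) ↔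
      i < N.toNat * N.toNat ∧
        pvReach N.toNat (bdGet board) (pvCellOf N.toNat L) (pvCellOf N.toNat i) := by
  rw [List.mem_filter, List.mem_range]
  constructor
  · rintro ⟨hi, hk⟩
    exact ⟨hi, (pvKey_label_iff N board lab hgood hfix hi hL hLfix).mp (by simpa using hk)⟩
  · rintro ⟨hi, hr⟩
    exact ⟨hi, by simpa using (pvKey_label_iff N board lab hgood hfix hi hL hLfix).mpr hr⟩

theorem pvLen_filter (n : Nat) (p : Nat → Bool) :
    ((List.range n).filter p).length = ((Finset.range n).filter (fun i => p i = true)).card := by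
  simp [Finset.filter, Finset.range, Multiset.range, Multiset.filter]

-- the component of (the cell of) a stable label L, as an image of its index set
theorem pvComp_card (N : Int) (board : List (List Int)) (lab : List Nat)
    (hgood : pvGood N board lab) (hfix : pvFix N board lab)
    (L : Nat) (hL : L < N.toNat * N.toNat) (hLfix : lab.getD L 0 = L) :
    ((List.range (N.toNat * N.toNat)).filter (fun i => lab.getD i 0 == L)).length =
      (pvComp N.toNat (bdGet board) (pvCellOf N.toNat L)).card := by
  rw [pvLen_filter]
  have hset : pvComp N.toNat (bdGet board) (pvCellOf N.toNat L) =
      ((Finset.range (N.toNat * N.toNat)).filter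
        (fun i => (lab.getD i 0 == L) = true)).image (pvCellOf N.toNat) := by
    ext q
    rw [pvMem_comp (pvCellOf_inR hL), Finset.mem_image]
    constructor
    · intro hr
      have hq : pvInR N.toNat q := pvReach_inR (pvCellOf_inR hL) hr
      refine ⟨pvIdx N.toNat q, ?_, pvCellOf_idx hq⟩
      rw [Finset.mem_filter, Finset.mem_range]
      have hi := pvIdx_lt hq
      refine ⟨hi, ?_⟩
      simp only [beq_iff_eq]
      rw [pvKey_label_iff N board lab hgood hfix hi hL hLfix, pvCellOf_idx hq]
      exact hr
    · rintro ⟨i, hi, rfl⟩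
      rw [Finset.mem_filter, Finset.mem_range] at hi
      obtain ⟨hi1, hi2⟩ := hi
      exact (pvKey_label_iff N board lab hgood hfix hi1 hL hLfix).mp (by simpa using hi2)
  rw [hset]
  rw [Finset.card_image_of_injOn]
  intro i hi j hj hij
  rw [Finset.coe_filter] at hi hj
  simp only [Set.mem_setOf_eq, Finset.mem_range] at hi hj
  have := pvIdx_cellOf (M := N.toNat) hi.1
  rw [hij, pvIdx_cellOf hj.1] at this
  omega

-- the running min over a component's cells is its minimum board value
theorem pvAgg_canon (N : Int) (board : List (List Int)) (lab : List Nat)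
    (hgood : pvGood N board lab) (hfix : pvFix N board lab)
    (L : Nat) (hL : L < N.toNat * N.toNat) (hLfix : lab.getD L 0 = L) :
    pvAgg N board lab (N.toNat * N.toNat) L =
      (((pvComp N.toNat (bdGet board) (pvCellOf N.toNat L)).card : Int),
        ((pvComp N.toNat (bdGet board) (pvCellOf N.toNat L)).image
          (fun q => bdGet board q.1 q.2)).min.getD 0) := by
  have hLmem : L ∈ (List.range (N.toNat * N.toNat)).filter (fun i => lab.getD i 0 == L) :=
    (pvFilt_mem N board lab hgood hfix L hL hLfix L).mpr ⟨hL, Relation.ReflTransGen.refl⟩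
  rcases hf : (List.range (N.toNat * N.toNat)).filter (fun i => lab.getD i 0 == L) with _ | ⟨j, js⟩
  · rw [hf] at hLmem; cases hLmem
  · have hlen := pvComp_card N board lab hgood hfix L hL hLfix
    rw [hf] at hlen
    have hmin : pvIsMin N.toNat (bdGet board) (pvCellOf N.toNat L)
        (js.foldl (fun m i => min m (bdGet board (i / N.toNat) (i % N.toNat)))
          (bdGet board (j / N.toNat) (j % N.toNat))) := by
      constructor
      · -- the fold value is attained at some cell of the component
        rcases pvFoldMin_mem (fun i => bdGet board (i / N.toNat) (i % N.toNat)) js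
            (bdGet board (j / N.toNat) (j % N.toNat)) with h | ⟨x, hx, h⟩
        · refine ⟨pvCellOf N.toNat j, ?_, h⟩
          have : j ∈ (List.range (N.toNat * N.toNat)).filter (fun i => lab.getD i 0 == L) := by
            rw [hf]; simp
          exact ((pvFilt_mem N board lab hgood hfix L hL hLfix j).mp this).2
        · refine ⟨pvCellOf N.toNat x, ?_, h⟩
          have : x ∈ (List.range (N.toNat * N.toNat)).filter (fun i => lab.getD i 0 == L) := by
            rw [hf]; simp [hx]
          exact ((pvFilt_mem N board lab hgood hfix L hL hLfix x).mp this).2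
      · -- and bounds every cell of the component
        intro q hq
        have hqIn : pvInR N.toNat q := pvReach_inR (pvCellOf_inR hL) hq
        have hidx : pvIdx N.toNat q ∈
            (List.range (N.toNat * N.toNat)).filter (fun i => lab.getD i 0 == L) := by
          rw [pvFilt_mem N board lab hgood hfix L hL hLfix]
          exact ⟨pvIdx_lt hqIn, by rw [pvCellOf_idx hqIn]; exact hq⟩
        rw [hf] at hidx
        have hval : bdGet board (pvIdx N.toNat q / N.toNat) (pvIdx N.toNat q % N.toNat) =
            bdGet board q.1 q.2 := by
          have := pvCellOf_idx hqIn
          simp only [pvCellOf] at this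
          rw [show pvIdx N.toNat q / N.toNat = q.1 from congrArg Prod.fst this,
            show pvIdx N.toNat q % N.toNat = q.2 from congrArg Prod.snd this]
        rcases List.mem_cons.mp hidx with h | h
        · rw [← hval, ← h]
          exact pvFoldMin_le_init _ _ _
        · rw [← hval]
          exact pvFoldMin_le _ _ _ _ h
    have heqmin := pvIsMin_unique hmin (pvCompMin_isMin (b := bdGet board) (pvCellOf_inR hL))
    have hAgg : pvAgg N board lab (N.toNat * N.toNat) L =
        ((js.length : Int) + 1,
          js.foldl (fun m i => min m (bdGet board (i / N.toNat) (i % N.toNat)))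
            (bdGet board (j / N.toNat) (j % N.toNat))) := by
      unfold pvAgg
      rw [hf]
    rw [hAgg, heqmin]
    refine Prod.ext ?_ rfl
    show (js.length : Int) + 1 = ((pvComp N.toNat (bdGet board) (pvCellOf N.toNat L)).card : Int)
    rw [← hlen]
    push_cast [List.length_cons]
    ring

theorem pvBool_ext {a b : Bool} (h : a = true ↔ b = true) : a = b := by
  cases a <;> cases b <;> simp_all

-- solution_alt computes the canonical per-component fold
theorem pvAltEq (N : Int) (board : List (List Int)) :
    solution_alt N board =
      PySem.Int.toStr (((pvCanon N.toNat (bdGet board)).foldl bestB (1, 1)).1) ++ " " ++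
      PySem.Int.toStr (((pvCanon N.toNat (bdGet board)).foldl bestB (1, 1)).2) := by
  unfold solution_alt
  rw [pvCells_eq]
  dsimp only
  have hfuel : (List.range (N.toNat * N.toNat)).sum <
      N.toNat * N.toNat * (N.toNat * N.toNat) + 1 := by
    have := pvSum_range_le (N.toNat * N.toNat)
    omega
  obtain ⟨hgood, hfix⟩ := propB_fix N board (N.toNat * N.toNat * (N.toNat * N.toNat) + 1)
    (List.range (N.toNat * N.toNat)) (pvGood_range N board) hfuel
  set labF := propB N board (N.toNat * N.toNat)
    (N.toNat * N.toNat * (N.toNat * N.toNat) + 1) (List.range (N.toNat * N.toNat)) with hlabF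
  have hitems := pvTally_items N board labF hgood hfix (N.toNat * N.toNat) (le_refl _)
  have hvalues : ((List.range (N.toNat * N.toNat)).foldl (tallyCellB N board labF)
      PySem.Dict.empty).values = pvCanon N.toNat (bdGet board) := by
    show ((List.range (N.toNat * N.toNat)).foldl (tallyCellB N board labF)
      PySem.Dict.empty).items.map Prod.snd = _
    rw [hitems, List.map_map]
    have hfc : (List.range (N.toNat * N.toNat)).filter (fun L => labF.getD L 0 == L) =
        (List.range (N.toNat * N.toNat)).filter (pvFirst N.toNat (bdGet board)) := by
      apply List.filter_congr
      intro i hi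
      apply pvBool_ext
      rw [beq_iff_eq, pvFirst_iff]
      exact pvKey_first_iff N board labF hgood hfix (List.mem_range.mp hi)
    rw [hfc]
    unfold pvCanon
    apply List.map_congr_left
    intro L hL
    have hL1 : L < N.toNat * N.toNat := List.mem_range.mp (List.mem_of_mem_filter hL)
    have hLfirst : pvFirst N.toNat (bdGet board) L = true := by
      have := (List.mem_filter.mp hL).2
      simpa using this
    have hLfix : labF.getD L 0 = L := by
      rw [pvKey_first_iff N board labF hgood hfix hL1]
      exact (pvFirst_iff).mp hLfirst
    show (Prod.snd ∘ fun L => (L, pvAgg N board labF (N.toNat * N.toNat) L)) L = _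
    simp only [Function.comp_apply]
    exact pvAgg_canon N board labF hgood hfix L hL1 hLfix
  rw [hvalues]

-- ================= A-side: the BFS flood fill computes components =================

-- target cell of direction d from (r, c), as the port computes it
def pvTgt (r c : Nat) (d : Int × Int) : Nat × Nat :=
  (((r : Int) + d.1).toNat, ((c : Int) + d.2).toNat)

-- the two guards of stepA, bundled
def pvG (N : Int) (board : List (List Int)) (r c : Nat) (d : Int × Int) : Prop :=
  (0 ≤ (r : Int) + d.1 ∧ (r : Int) + d.1 < N ∧ 0 ≤ (c : Int) + d.2 ∧ (c : Int) + d.2 < N) ∧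
  (bdGet board r c - bdGet board (pvTgt r c d).1 (pvTgt r c d).2).natAbs = 1

-- a fired guard is an edge of the graph
theorem pvG_E {N : Int} {board : List (List Int)} {r c : Nat} {d : Int × Int}
    (hd : d ∈ dirsA) (hr : r < N.toNat) (hc : c < N.toNat)
    (hg : pvG N board r c d) : pvE N.toNat (bdGet board) (r, c) (pvTgt r c d) := by
  obtain ⟨⟨b1, b2, b3, b4⟩, hv⟩ := hg
  have hInt : pvInR N.toNat (pvTgt r c d) := by
    constructor
    · show ((r : Int) + d.1).toNat < N.toNat; omega
    · show ((c : Int) + d.2).toNat < N.toNat; omega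
  refine ⟨⟨hr, hc⟩, hInt, ?_, hv⟩
  simp only [dirsA, List.mem_cons, List.not_mem_nil, or_false] at hd
  rcases hd with rfl | rfl | rfl | rfl
  · simp only [pvTgt]
    exact Or.inr ⟨by omega, Or.inr (by omega)⟩
  · simp only [pvTgt]
    exact Or.inl ⟨by omega, Or.inl (by omega)⟩
  · simp only [pvTgt]
    exact Or.inr ⟨by omega, Or.inl (by omega)⟩
  · simp only [pvTgt]
    exact Or.inl ⟨by omega, Or.inr (by omega)⟩

-- every edge of the graph out of (r, c) fires the guard of some direction
theorem pvCoverA {N : Int} {board : List (List Int)} {r c : Nat} {q : Nat × Nat}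
    (he : pvE N.toNat (bdGet board) (r, c) q) :
    ∃ d ∈ dirsA, q = pvTgt r c d ∧ pvG N board r c d := by
  obtain ⟨qa, qb⟩ := q
  obtain ⟨⟨hr, hc⟩, ⟨hq1, hq2⟩, hgeo, hv⟩ := he
  have hN : 0 < N := by omega
  rcases hgeo with ⟨he1, he2 | he2⟩ | ⟨he1, he2 | he2⟩
  · refine ⟨(0, 1), by simp [dirsA], ?_, ?_⟩
    · simp only [pvTgt, Prod.mk.injEq]; constructor <;> omega
    · refine ⟨⟨by omega, by omega, by omega, by omega⟩, ?_⟩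
      have ht : pvTgt r c (0, 1) = (qa, qb) := by
        simp only [pvTgt, Prod.mk.injEq]; constructor <;> omega
      rw [ht]; exact hv
  · refine ⟨(0, -1), by simp [dirsA], ?_, ?_⟩
    · simp only [pvTgt, Prod.mk.injEq]; constructor <;> omega
    · refine ⟨⟨by omega, by omega, by omega, by omega⟩, ?_⟩
      have ht : pvTgt r c (0, -1) = (qa, qb) := by
        simp only [pvTgt, Prod.mk.injEq]; constructor <;> omega
      rw [ht]; exact hv
  · refine ⟨(1, 0), by simp [dirsA], ?_, ?_⟩
    · simp only [pvTgt, Prod.mk.injEq]; constructor <;> omega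
    · refine ⟨⟨by omega, by omega, by omega, by omega⟩, ?_⟩
      have ht : pvTgt r c (1, 0) = (qa, qb) := by
        simp only [pvTgt, Prod.mk.injEq]; constructor <;> omega
      rw [ht]; exact hv
  · refine ⟨(-1, 0), by simp [dirsA], ?_, ?_⟩
    · simp only [pvTgt, Prod.mk.injEq]; constructor <;> omega
    · refine ⟨⟨by omega, by omega, by omega, by omega⟩, ?_⟩
      have ht : pvTgt r c (-1, 0) = (qa, qb) := by
        simp only [pvTgt, Prod.mk.injEq]; constructor <;> omega
      rw [ht]; exact hv

-- marking one cell in the check matrix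
theorem pvChk_insert (check : Nat → Nat → Bool) (U V : Finset (Nat × Nat)) (t : Nat × Nat)
    (h : ∀ rr cc, check rr cc = true ↔ ((rr, cc) ∈ U ∨ (rr, cc) ∈ V)) :
    ∀ rr cc, chkSet check t.1 t.2 rr cc = true ↔ ((rr, cc) ∈ U ∨ (rr, cc) ∈ insert t V) := by
  intro rr cc
  simp only [chkSet, Finset.mem_insert]
  split_ifs with he
  · simp only [true_iff]
    right; left
    obtain ⟨h1, h2⟩ := he
    rw [h1, h2]
  · rw [h rr cc]
    constructor
    · rintro (h' | h')
      · exact Or.inl h'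
      · exact Or.inr (Or.inr h')
    · rintro (h' | h' | h')
      · exact Or.inl h'
      · refine absurd ⟨congrArg Prod.fst h', congrArg Prod.snd h'⟩ he
      · exact Or.inr h'

theorem pvCard_le {M : Nat} {W : Finset (Nat × Nat)} (h : ∀ p ∈ W, pvInR M p) :
    W.card ≤ M * M := by
  have : W ⊆ Finset.range M ×ˢ Finset.range M := by
    intro p hp
    rw [Finset.mem_product, Finset.mem_range, Finset.mem_range]
    exact ⟨(h p hp).1, (h p hp).2⟩
  calc W.card ≤ (Finset.range M ×ˢ Finset.range M).card := Finset.card_le_card this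
  _ = M * M := by rw [Finset.card_product, Finset.card_range]

-- the BFS loop invariant
def pvInv (N : Int) (board : List (List Int)) (s : Nat × Nat) (U V : Finset (Nat × Nat))
    (queue : List (Nat × Nat)) (check : Nat → Nat → Bool) (v cnt : Int) : Prop :=
  (∀ rr cc, check rr cc = true ↔ ((rr, cc) ∈ U ∨ (rr, cc) ∈ V)) ∧
  (∀ p ∈ V, pvReach N.toNat (bdGet board) s p) ∧
  s ∈ V ∧
  (∀ p ∈ queue, p ∈ V) ∧
  (∀ p ∈ U, ¬ pvReach N.toNat (bdGet board) s p) ∧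
  cnt = (V.card : Int) ∧
  (∃ p ∈ V, v = bdGet board p.1 p.2) ∧
  (∀ p ∈ V, v ≤ bdGet board p.1 p.2)

theorem pvStep_inv (N : Int) (board : List (List Int)) (s : Nat × Nat)
    (U V : Finset (Nat × Nat)) (queue : List (Nat × Nat)) (check : Nat → Nat → Bool)
    (v cnt : Int) (r c : Nat) (d : Int × Int)
    (hd : d ∈ dirsA) (hs : pvInR N.toNat s) (hrc : (r, c) ∈ V)
    (hInv : pvInv N board s U V queue check v cnt) :
    ∃ W : Finset (Nat × Nat),
      V ⊆ W ∧
      pvInv N board s U W (stepA N board r c (queue, check, v, cnt) d).1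
        (stepA N board r c (queue, check, v, cnt) d).2.1
        (stepA N board r c (queue, check, v, cnt) d).2.2.1
        (stepA N board r c (queue, check, v, cnt) d).2.2.2 ∧
      (∃ l, (stepA N board r c (queue, check, v, cnt) d).1 = queue ++ l ∧ (∀ p ∈ l, p ∈ W) ∧
        ∀ p ∈ W, p ∈ V ∨ p ∈ l) ∧
      (pvG N board r c d → pvTgt r c d ∈ W) ∧
      (stepA N board r c (queue, check, v, cnt) d).1.length + (N.toNat * N.toNat - W.card) =
        queue.length + (N.toNat * N.toNat - V.card) := by
  obtain ⟨hchk, hV, hsV, hq, hU, hcnt, hex, hlb⟩ := hInv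
  have hrcR : pvReach N.toNat (bdGet board) s (r, c) := hV _ hrc
  have hrInR : pvInR N.toNat (r, c) := pvReach_inR hs hrcR
  simp only [stepA]
  split_ifs with hbnd hcond
  · -- guard and eligibility fired: mark and enqueue the target
    set t : Nat × Nat := (((r : Int) + d.1).toNat, ((c : Int) + d.2).toNat) with hT
    have htEq : t = pvTgt r c d := rfl
    have hg : pvG N board r c d := ⟨hbnd, hcond.1⟩
    have hE : pvE N.toNat (bdGet board) (r, c) (pvTgt r c d) := pvG_E hd hrInR.1 hrInR.2 hg
    have htR : pvReach N.toNat (bdGet board) s t := by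
      rw [htEq]; exact hrcR.tail hE
    have htV : t ∉ V := by
      intro hmem
      have := (hchk t.1 t.2).mpr (Or.inr hmem)
      rw [hcond.2] at this
      cases this
    have hWInR : ∀ p ∈ insert t V, pvInR N.toNat p := by
      intro p hp
      rcases Finset.mem_insert.mp hp with rfl | hp
      · exact pvReach_inR hs htR
      · exact pvReach_inR hs (hV _ hp)
    have hcard : (insert t V).card = V.card + 1 := Finset.card_insert_of_notMem htV
    have hcardle : V.card + 1 ≤ N.toNat * N.toNat := by
      rw [← hcard]; exact pvCard_le hWInR
    refine ⟨insert t V, Finset.subset_insert _ _, ?_, ⟨[t], rfl, by simp, ?_⟩,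
      fun _ => Finset.mem_insert_self _ _, ?_⟩
    · refine ⟨pvChk_insert check U V t hchk, ?_, Finset.mem_insert_of_mem hsV, ?_, hU, ?_, ?_, ?_⟩
      · intro p hp
        rcases Finset.mem_insert.mp hp with rfl | hp
        · exact htR
        · exact hV _ hp
      · intro p hp
        rcases List.mem_append.mp hp with hp | hp
        · exact Finset.mem_insert_of_mem (hq _ hp)
        · rw [List.mem_singleton.mp hp]; exact Finset.mem_insert_self _ _
      · rw [hcard, hcnt]; push_cast; ring
      · rcases min_choice v (bdGet board t.1 t.2) with hm | hm <;> rw [hm]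
        · obtain ⟨p, hp, he⟩ := hex
          exact ⟨p, Finset.mem_insert_of_mem hp, he⟩
        · exact ⟨t, Finset.mem_insert_self _ _, rfl⟩
      · intro p hp
        rcases Finset.mem_insert.mp hp with rfl | hp
        · exact min_le_right _ _
        · exact le_trans (min_le_left _ _) (hlb _ hp)
    · intro p hp
      rcases Finset.mem_insert.mp hp with rfl | hp
      · exact Or.inr (by simp)
      · exact Or.inl hp
    · simp only [List.length_append, List.length_singleton]
      omega
  · -- guard fired but the cell is ineligible or already marked
    refine ⟨V, Finset.Subset.refl _, ⟨hchk, hV, hsV, hq, hU, hcnt, hex, hlb⟩,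
      ⟨[], by simp, by simp, fun p hp => Or.inl hp⟩, ?_, rfl⟩
    intro hg
    have hE : pvE N.toNat (bdGet board) (r, c) (pvTgt r c d) := pvG_E hd hrInR.1 hrInR.2 hg
    have htR : pvReach N.toNat (bdGet board) s (pvTgt r c d) := hrcR.tail hE
    have hchkt : check (pvTgt r c d).1 (pvTgt r c d).2 = true := by
      rcases hcb : check (pvTgt r c d).1 (pvTgt r c d).2 with _ | _
      · exact absurd ⟨hg.2, hcb⟩ hcond
      · rfl
    rcases (hchk _ _).mp hchkt with h | h
    · exact absurd htR (hU _ h)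
    · exact h
  · -- out of bounds: nothing happens
    refine ⟨V, Finset.Subset.refl _, ⟨hchk, hV, hsV, hq, hU, hcnt, hex, hlb⟩,
      ⟨[], by simp, by simp, fun p hp => Or.inl hp⟩, ?_, rfl⟩
    intro hg
    exact absurd hg.1 hbnd

theorem pvFold4 (N : Int) (board : List (List Int)) (s : Nat × Nat)
    (U V : Finset (Nat × Nat)) (queue : List (Nat × Nat)) (check : Nat → Nat → Bool)
    (v cnt : Int) (r c : Nat)
    (hs : pvInR N.toNat s) (hrc : (r, c) ∈ V)
    (hInv : pvInv N board s U V queue check v cnt) :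
    ∃ W : Finset (Nat × Nat),
      V ⊆ W ∧
      pvInv N board s U W (dirsA.foldl (stepA N board r c) (queue, check, v, cnt)).1
        (dirsA.foldl (stepA N board r c) (queue, check, v, cnt)).2.1
        (dirsA.foldl (stepA N board r c) (queue, check, v, cnt)).2.2.1
        (dirsA.foldl (stepA N board r c) (queue, check, v, cnt)).2.2.2 ∧
      (∃ l, (dirsA.foldl (stepA N board r c) (queue, check, v, cnt)).1 = queue ++ l ∧
        (∀ p ∈ l, p ∈ W) ∧ ∀ p ∈ W, p ∈ V ∨ p ∈ l) ∧
      (∀ q, pvE N.toNat (bdGet board) (r, c) q → q ∈ W) ∧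
      (dirsA.foldl (stepA N board r c) (queue, check, v, cnt)).1.length +
          (N.toNat * N.toNat - W.card) =
        queue.length + (N.toNat * N.toNat - V.card) := by
  obtain ⟨W1, hVW1, hInv1, ⟨l1, hql1, hl1, hWl1⟩, hg1, hf1⟩ :=
    pvStep_inv N board s U V queue check v cnt r c (-1, 0) (by simp [dirsA]) hs hrc hInv
  obtain ⟨W2, hW12, hInv2, ⟨l2, hql2, hl2, hWl2⟩, hg2, hf2⟩ :=
    pvStep_inv N board s U W1
      (stepA N board r c (queue, check, v, cnt) (-1, 0)).1
      (stepA N board r c (queue, check, v, cnt) (-1, 0)).2.1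
      (stepA N board r c (queue, check, v, cnt) (-1, 0)).2.2.1
      (stepA N board r c (queue, check, v, cnt) (-1, 0)).2.2.2
      r c (0, 1) (by simp [dirsA]) hs (hVW1 hrc) hInv1
  obtain ⟨W3, hW23, hInv3, ⟨l3, hql3, hl3, hWl3⟩, hg3, hf3⟩ :=
    pvStep_inv N board s U W2
      (stepA N board r c (stepA N board r c (queue, check, v, cnt) (-1, 0)) (0, 1)).1
      (stepA N board r c (stepA N board r c (queue, check, v, cnt) (-1, 0)) (0, 1)).2.1
      (stepA N board r c (stepA N board r c (queue, check, v, cnt) (-1, 0)) (0, 1)).2.2.1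
      (stepA N board r c (stepA N board r c (queue, check, v, cnt) (-1, 0)) (0, 1)).2.2.2
      r c (1, 0) (by simp [dirsA]) hs (hW12 (hVW1 hrc)) hInv2
  obtain ⟨W4, hW34, hInv4, ⟨l4, hql4, hl4, hWl4⟩, hg4, hf4⟩ :=
    pvStep_inv N board s U W3
      (stepA N board r c (stepA N board r c (stepA N board r c (queue, check, v, cnt) (-1, 0)) (0, 1)) (1, 0)).1
      (stepA N board r c (stepA N board r c (stepA N board r c (queue, check, v, cnt) (-1, 0)) (0, 1)) (1, 0)).2.1
      (stepA N board r c (stepA N board r c (stepA N board r c (queue, check, v, cnt) (-1, 0)) (0, 1)) (1, 0)).2.2.1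
      (stepA N board r c (stepA N board r c (stepA N board r c (queue, check, v, cnt) (-1, 0)) (0, 1)) (1, 0)).2.2.2
      r c (0, -1) (by simp [dirsA]) hs (hW23 (hW12 (hVW1 hrc))) hInv3
  have hfold : dirsA.foldl (stepA N board r c) (queue, check, v, cnt) =
      stepA N board r c (stepA N board r c (stepA N board r c
        (stepA N board r c (queue, check, v, cnt) (-1, 0)) (0, 1)) (1, 0)) (0, -1) := rfl
  rw [hfold]
  refine ⟨W4, fun p hp => hW34 (hW23 (hW12 (hVW1 hp))), hInv4,
    ⟨l1 ++ l2 ++ l3 ++ l4, ?_, ?_, ?_⟩, ?_, ?_⟩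
  · rw [hql4, hql3, hql2, hql1]
    simp [List.append_assoc]
  · intro p hp
    simp only [List.mem_append] at hp
    rcases hp with ((hp | hp) | hp) | hp
    · exact hW34 (hW23 (hW12 (hl1 p hp)))
    · exact hW34 (hW23 (hl2 p hp))
    · exact hW34 (hl3 p hp)
    · exact hl4 p hp
  · intro p hp
    rcases hWl4 p hp with hp3 | hp
    · rcases hWl3 p hp3 with hp2 | hp
      · rcases hWl2 p hp2 with hp1 | hp
        · rcases hWl1 p hp1 with hp0 | hp
          · exact Or.inl hp0
          · exact Or.inr (by simp [hp])
        · exact Or.inr (by simp [hp])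
      · exact Or.inr (by simp [hp])
    · exact Or.inr (by simp [hp])
  · intro q he
    obtain ⟨d, hd, rfl, hg⟩ := pvCoverA he
    simp only [dirsA, List.mem_cons, List.not_mem_nil, or_false] at hd
    rcases hd with rfl | rfl | rfl | rfl
    · exact hW34 (hW23 (hW12 (hg1 hg)))
    · exact hW34 (hW23 (hg2 hg))
    · exact hW34 (hg3 hg)
    · exact hg4 hg
  · rw [hf4, hf3, hf2, hf1]

theorem pvBfs (N : Int) (board : List (List Int)) (s : Nat × Nat) (U : Finset (Nat × Nat))
    (hs : pvInR N.toNat s) :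
    ∀ (fuel : Nat) (queue : List (Nat × Nat)) (check : Nat → Nat → Bool) (v cnt : Int)
      (V : Finset (Nat × Nat)),
      pvInv N board s U V queue check v cnt →
      (∀ p ∈ V, p ∉ queue → ∀ q, pvE N.toNat (bdGet board) p q → q ∈ V) →
      queue.length + (N.toNat * N.toNat - V.card) < fuel →
      (∀ rr cc, (bfsA N board fuel queue check v cnt).1 rr cc = true ↔
        ((rr, cc) ∈ U ∨ pvReach N.toNat (bdGet board) s (rr, cc))) ∧
      pvIsMin N.toNat (bdGet board) s (bfsA N board fuel queue check v cnt).2.1 ∧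
      (bfsA N board fuel queue check v cnt).2.2 =
        ((pvComp N.toNat (bdGet board) s).card : Int) := by
  intro fuel
  induction fuel with
  | zero => intro queue check v cnt V _ _ hf; omega
  | succ fuel ih =>
    intro queue check v cnt V hInv hclosed hf
    obtain ⟨hchk, hV, hsV, hq, hU, hcnt, hex, hlb⟩ := hInv
    match queue with
    | [] =>
      have hcomplete : ∀ q, pvReach N.toNat (bdGet board) s q → q ∈ V := by
        intro q hq'
        induction hq' with
        | refl => exact hsV
        | tail hr e ihq => exact hclosed _ ihq (List.not_mem_nil) _ e
      have hVr : ∀ q, q ∈ V ↔ pvReach N.toNat (bdGet board) s q :=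
        fun q => ⟨hV q, hcomplete q⟩
      show (∀ rr cc, check rr cc = true ↔ _) ∧ pvIsMin _ _ _ v ∧ cnt = _
      refine ⟨?_, ⟨?_, ?_⟩, ?_⟩
      · intro rr cc
        rw [hchk rr cc, hVr]
      · obtain ⟨p, hp, he⟩ := hex
        exact ⟨p, (hVr p).mp hp, he⟩
      · intro p hp
        exact hlb p ((hVr p).mpr hp)
      · rw [hcnt]
        congr 1
        apply Finset.card_bij (fun a _ => a)
        · intro a ha
          rw [pvMem_comp hs]
          exact (hVr a).mp ha
        · intro a _ b _ h
          exact h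
        · intro a ha
          rw [pvMem_comp hs] at ha
          exact ⟨a, (hVr a).mpr ha, rfl⟩
    | (r, c) :: rest =>
      have hrc : (r, c) ∈ V := hq _ (by simp)
      obtain ⟨W, hVW, hInvW, ⟨l, hql, hlW, hWl⟩, hgW, hfW⟩ :=
        pvFold4 N board s U V rest check v cnt r c hs hrc
          ⟨hchk, hV, hsV, fun p hp => hq p (by simp [hp]), hU, hcnt, hex, hlb⟩
      have hstep : bfsA N board (fuel + 1) ((r, c) :: rest) check v cnt =
          bfsA N board fuel
            (dirsA.foldl (stepA N board r c) (rest, check, v, cnt)).1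
            (dirsA.foldl (stepA N board r c) (rest, check, v, cnt)).2.1
            (dirsA.foldl (stepA N board r c) (rest, check, v, cnt)).2.2.1
            (dirsA.foldl (stepA N board r c) (rest, check, v, cnt)).2.2.2 := rfl
      rw [hstep]
      apply ih _ _ _ _ _ hInvW
      · -- closure for the new state
        intro p hp hpq q he
        rcases hWl p hp with hpV | hpl
        · by_cases hpe : p = (r, c)
          · subst hpe
            exact hgW q he
          · have hpold : p ∉ (r, c) :: rest := by
              intro hmem
              rcases List.mem_cons.mp hmem with h | h
              · exact hpe h
              · exact hpq (by rw [hql]; exact List.mem_append_left _ h)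
            exact hVW (hclosed p hpV hpold q he)
        · exact absurd (by rw [hql]; exact List.mem_append_right _ hpl) hpq
      · -- fuel bookkeeping
        rw [hfW]
        simp only [List.length_cons] at hf
        omega

-- cells already flooded after the first k outer iterations
noncomputable def pvU (N : Int) (board : List (List Int)) (k : Nat) : Finset (Nat × Nat) :=
  @Finset.filter _ (fun q => ∃ j, j < k ∧ pvReach N.toNat (bdGet board) (pvCellOf N.toNat j) q)
    (fun _ => Classical.propDecidable _) (Finset.range N.toNat ×ˢ Finset.range N.toNat)

theorem pvMem_U {N : Int} {board : List (List Int)} {k : Nat} (hk : k ≤ N.toNat * N.toNat)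
    (q : Nat × Nat) :
    q ∈ pvU N board k ↔ ∃ j, j < k ∧ pvReach N.toNat (bdGet board) (pvCellOf N.toNat j) q := by
  simp only [pvU, Finset.mem_filter, Finset.mem_product, Finset.mem_range]
  constructor
  · exact fun h => h.2
  · intro h
    obtain ⟨j, hj, hr⟩ := h
    have := pvReach_inR (pvCellOf_inR (M := N.toNat) (by omega)) hr
    exact ⟨⟨this.1, this.2⟩, j, hj, hr⟩

-- A's running-answer update is B's bestB
theorem pvCmp (st : Int × Int) (v cnt : Int) :
    (if cnt > st.2 then (v, cnt)
      else if cnt = st.2 then (min st.1 v, st.2) else (st.1, st.2)) = bestB st (cnt, v) := by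
  simp only [bestB]
  obtain ⟨a, b⟩ := st
  split_ifs <;> simp_all [Prod.ext_iff] <;> omega

-- the row-major cell list
theorem pvCellsList (N : Int) :
    (List.range N.toNat).flatMap (fun row => (List.range N.toNat).map (fun col => (row, col))) =
      (List.range (N.toNat * N.toNat)).map (pvCellOf N.toNat) := by
  suffices h : ∀ R : Nat,
      (List.range R).flatMap (fun row => (List.range N.toNat).map (fun col => (row, col))) =
        (List.range (R * N.toNat)).map (pvCellOf N.toNat) by
    exact h N.toNat
  intro R
  induction R with
  | zero => simp
  | succ R ih =>
    rw [List.range_succ, List.flatMap_append, ih, show (R + 1) * N.toNat = R * N.toNat + N.toNat by ring,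
      List.range_add, List.map_append, List.map_map]
    congr 1
    simp only [List.flatMap_cons, List.flatMap_nil, List.append_nil]
    apply List.map_congr_left
    intro col hcol
    have := List.mem_range.mp hcol
    simp only [Function.comp_apply]
    exact (pvCellOf_mk this).symm

theorem pvOuter (N : Int) (board : List (List Int)) :
    ∀ k, k ≤ N.toNat * N.toNat →
      (∀ rr cc, (((List.range k).map (pvCellOf N.toNat)).foldl (cellA N board)
          (1, 1, fun _ _ => false)).2.2 rr cc = true ↔ (rr, cc) ∈ pvU N board k) ∧
      ((((List.range k).map (pvCellOf N.toNat)).foldl (cellA N board)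
          (1, 1, fun _ _ => false)).1,
        (((List.range k).map (pvCellOf N.toNat)).foldl (cellA N board)
          (1, 1, fun _ _ => false)).2.1) =
        (((List.range k).filter (pvFirst N.toNat (bdGet board))).map
          (fun i => (((pvComp N.toNat (bdGet board) (pvCellOf N.toNat i)).card : Int),
            ((pvComp N.toNat (bdGet board) (pvCellOf N.toNat i)).image
              (fun q => bdGet board q.1 q.2)).min.getD 0))).foldl bestB (1, 1) := by
  intro k
  induction k with
  | zero =>
    intro _
    constructor
    · intro rr cc
      simp only [List.range_zero, List.map_nil, List.foldl_nil]
      rw [pvMem_U (by omega)]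
      simp
    · simp
  | succ k ih =>
    intro hk1
    have hk : k < N.toNat * N.toNat := by omega
    obtain ⟨ihc, ihp⟩ := ih (by omega)
    rw [List.range_succ, List.map_append, List.foldl_append, List.filter_append,
      List.map_append, List.foldl_append]
    simp only [List.map_cons, List.map_nil, List.foldl_cons, List.foldl_nil]
    set stk := ((List.range k).map (pvCellOf N.toNat)).foldl (cellA N board)
      (1, 1, fun _ _ => false) with hstk
    by_cases hmrk : stk.2.2 (pvCellOf N.toNat k).1 (pvCellOf N.toNat k).2 = true
    · -- cell k is already flooded: skipped, and it is not a first cell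
      have hcell : cellA N board stk (pvCellOf N.toNat k) = stk := by
        unfold cellA
        rw [hmrk]
        simp
      obtain ⟨j0, hj0, hr0⟩ : ∃ j, j < k ∧
          pvReach N.toNat (bdGet board) (pvCellOf N.toNat j) (pvCellOf N.toNat k) := by
        have := (ihc _ _).mp hmrk
        rwa [pvMem_U (by omega)] at this
      have hfirst : pvFirst N.toNat (bdGet board) k = false := by
        rw [← Bool.not_eq_true, pvFirst_iff]
        push_neg
        refine ⟨pvCellOf N.toNat j0, pvReach_symm _ _ hr0, ?_⟩
        rw [pvIdx_cellOf (by omega)]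
        omega
      have hfiltnil : List.filter (pvFirst N.toNat (bdGet board)) [k] = [] := by
        simp [hfirst]
      rw [hcell, hfiltnil]
      simp only [List.map_nil, List.foldl_nil]
      refine ⟨?_, ihp⟩
      intro rr cc
      rw [ihc rr cc, pvMem_U (by omega), pvMem_U (by omega)]
      constructor
      · rintro ⟨j, hj, hr⟩
        exact ⟨j, by omega, hr⟩
      · rintro ⟨j, hj, hr⟩
        rcases Nat.lt_succ_iff_lt_or_eq.mp hj with hj | rfl
        · exact ⟨j, hj, hr⟩
        · exact ⟨j0, hj0, hr0.trans hr⟩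
    · -- cell k starts a fresh BFS: it is the first cell of its component
      have hmrkf : stk.2.2 (pvCellOf N.toNat k).1 (pvCellOf N.toNat k).2 = false := by
        revert hmrk
        cases stk.2.2 (pvCellOf N.toNat k).1 (pvCellOf N.toNat k).2 <;> simp
      have hunm : ∀ j, j < k →
          ¬ pvReach N.toNat (bdGet board) (pvCellOf N.toNat j) (pvCellOf N.toNat k) := by
        intro j hj hr
        have : (pvCellOf N.toNat k) ∈ pvU N board k := by
          rw [pvMem_U (by omega)]
          exact ⟨j, hj, hr⟩
        exact hmrk ((ihc _ _).mpr this)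
      have hsInR : pvInR N.toNat (pvCellOf N.toNat k) := pvCellOf_inR hk
      have hfirst : pvFirst N.toNat (bdGet board) k = true := by
        rw [pvFirst_iff]
        intro q hq
        by_contra hlt
        have hqIn : pvInR N.toNat q := pvReach_inR hsInR hq
        have hidx : pvIdx N.toNat q < k := by omega
        have := hunm (pvIdx N.toNat q) hidx
        rw [pvCellOf_idx hqIn] at this
        exact this (pvReach_symm _ _ hq)
      -- run the BFS lemma
      have hchar0 : ∀ rr cc, stk.2.2 rr cc = true ↔
          ((rr, cc) ∈ pvU N board k ∨ (rr, cc) ∈ (∅ : Finset (Nat × Nat))) := by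
        intro rr cc
        rw [ihc rr cc]
        simp
      have hInv : pvInv N board (pvCellOf N.toNat k) (pvU N board k)
          (insert (pvCellOf N.toNat k) ∅)
          [pvCellOf N.toNat k]
          (chkSet stk.2.2 (pvCellOf N.toNat k).1 (pvCellOf N.toNat k).2)
          (bdGet board (pvCellOf N.toNat k).1 (pvCellOf N.toNat k).2) 1 := by
        refine ⟨pvChk_insert stk.2.2 (pvU N board k) ∅ (pvCellOf N.toNat k) hchar0, ?_, ?_, ?_, ?_, ?_, ?_, ?_⟩
        · intro p hp
          rcases Finset.mem_insert.mp hp with rfl | hp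
          · exact Relation.ReflTransGen.refl
          · cases hp
        · exact Finset.mem_insert_self _ _
        · intro p hp
          rw [List.mem_singleton.mp hp]
          exact Finset.mem_insert_self _ _
        · intro p hp hr
          rw [pvMem_U (by omega)] at hp
          obtain ⟨j, hj, hrj⟩ := hp
          exact hunm j hj (hrj.trans (pvReach_symm _ _ hr))
        · simp
        · exact ⟨pvCellOf N.toNat k, Finset.mem_insert_self _ _, rfl⟩
        · intro p hp
          rcases Finset.mem_insert.mp hp with rfl | hp
          · exact le_refl _
          · cases hp
      obtain ⟨hchr, hmin, hcard⟩ := pvBfs N board (pvCellOf N.toNat k) (pvU N board k) hsInR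
        (N.toNat * N.toNat + 1) [pvCellOf N.toNat k]
        (chkSet stk.2.2 (pvCellOf N.toNat k).1 (pvCellOf N.toNat k).2)
        (bdGet board (pvCellOf N.toNat k).1 (pvCellOf N.toNat k).2) 1
        (insert (pvCellOf N.toNat k) ∅) hInv
        (by
          intro p hp hpq
          rcases Finset.mem_insert.mp hp with rfl | hp
          · exact absurd (by simp) hpq
          · cases hp)
        (by
          rw [Finset.card_insert_of_notMem (by simp), Finset.card_empty]
          simp only [List.length_singleton]
          omega)
      set res := bfsA N board (N.toNat * N.toNat + 1) [pvCellOf N.toNat k]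
        (chkSet stk.2.2 (pvCellOf N.toNat k).1 (pvCellOf N.toNat k).2)
        (bdGet board (pvCellOf N.toNat k).1 (pvCellOf N.toNat k).2) 1 with hres
      have hstate : cellA N board stk (pvCellOf N.toNat k) =
          ((bestB (stk.1, stk.2.1) (res.2.2, res.2.1)).1,
            (bestB (stk.1, stk.2.1) (res.2.2, res.2.1)).2, res.1) := by
        unfold cellA
        rw [hmrkf]
        simp only [Bool.false_eq_true, if_false]
        rw [← pvCmp (stk.1, stk.2.1) res.2.1 res.2.2]
        split_ifs <;> rfl
      have hfilt : List.filter (pvFirst N.toNat (bdGet board)) [k] = [k] := by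
        simp [hfirst]
      rw [hstate, hfilt]
      constructor
      · intro rr cc
        show res.1 rr cc = true ↔ _
        rw [hchr rr cc, pvMem_U (by omega), pvMem_U (by omega)]
        constructor
        · rintro (⟨j, hj, hr⟩ | hr)
          · exact ⟨j, by omega, hr⟩
          · exact ⟨k, by omega, hr⟩
        · rintro ⟨j, hj, hr⟩
          rcases Nat.lt_succ_iff_lt_or_eq.mp hj with hj | rfl
          · exact Or.inl ⟨j, hj, hr⟩
          · exact Or.inr hr
      · show (bestB (stk.1, stk.2.1) (res.2.2, res.2.1)) = _
        simp only [List.map_cons, List.map_nil, List.foldl_cons, List.foldl_nil]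
        rw [← ihp]
        congr 1
        exact Prod.ext hcard (pvIsMin_unique hmin (pvCompMin_isMin hsInR))

-- solution computes the same canonical per-component fold
theorem pvSolEq (N : Int) (board : List (List Int)) :
    solution N board =
      PySem.Int.toStr (((pvCanon N.toNat (bdGet board)).foldl bestB (1, 1)).1) ++ " " ++
      PySem.Int.toStr (((pvCanon N.toNat (bdGet board)).foldl bestB (1, 1)).2) := by
  unfold solution
  dsimp only
  rw [pvCellsList]
  obtain ⟨_, hp⟩ := pvOuter N board (N.toNat * N.toNat) (le_refl _)
  unfold pvCanon
  rw [show (((List.range (N.toNat * N.toNat)).map (pvCellOf N.toNat)).foldl (cellA N board)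
      (1, 1, fun _ _ => false)).1 =
    ((((List.range (N.toNat * N.toNat)).filter (pvFirst N.toNat (bdGet board))).map
      (fun i => (((pvComp N.toNat (bdGet board) (pvCellOf N.toNat i)).card : Int),
        ((pvComp N.toNat (bdGet board) (pvCellOf N.toNat i)).image
          (fun q => bdGet board q.1 q.2)).min.getD 0))).foldl bestB (1, 1)).1
    from congrArg Prod.fst hp]
  rw [show (((List.range (N.toNat * N.toNat)).map (pvCellOf N.toNat)).foldl (cellA N board)
      (1, 1, fun _ _ => false)).2.1 =
    ((((List.range (N.toNat * N.toNat)).filter (pvFirst N.toNat (bdGet board))).map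
      (fun i => (((pvComp N.toNat (bdGet board) (pvCellOf N.toNat i)).card : Int),
        ((pvComp N.toNat (bdGet board) (pvCellOf N.toNat i)).image
          (fun q => bdGet board q.1 q.2)).min.getD 0))).foldl bestB (1, 1)).2
    from congrArg Prod.snd hp]

-- ===== VERDICT (by name: the statement is the Claim_ definition above) =====
theorem solution_spec : Claim_equal_solution := by
  intro N board _ _
  unfold Spec_solution
  rw [pvSolEq, pvAltEq]
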